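-- pv_equiv track=rewrite | github.com/idesignedmyself/credit_evo | backend/app/services/regulator_packets/cfpb_formatter.py | extract_disputed_accounts
-- ===== SOURCE A (Python) =====
-- from typing import Any, Dict, List
--
-- def extract_disputed_accounts(violations: List[Dict[str, Any]]) -> List[Dict[str, str]]:
--     """
--     Extract disputed account references from violations.
--
--     Deduplicated by (creditor, account_mask) pair.
--     Sorted for determinism.
--     """
--     accounts = []
--     seen = set()
--
--     for violation in violations:
--         creditor = violation.get("creditor_name", "")
--         acct_mask = violation.get("account_number_masked", "")
--         key = (creditor, acct_mask)
--
--         if key not in seen and creditor: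
--             accounts.append({
--                 "creditor_name": creditor,
--                 "account_number_masked": acct_mask,
--                 "account_type": violation.get("account_type", ""),
--             })
--             seen.add(key)
--
--     # Sort by creditor name, then account mask for determinism
--     return sorted(accounts, key=lambda a: (a["creditor_name"], a["account_number_masked"]))
-- ===== SOURCE B (Python) =====
-- from typing import Any, Dict, List
--
--
-- def extract_disputed_accounts(violations: List[Dict[str, Any]]) -> List[Dict[str, str]]:
--     # Map every violation with a truthy creditor to a record, in input order.
--     records = []
--     for violation in violations:
--         creditor = violation.get("creditor_name", "")
--         if creditor:
--             records.append({
--                 "creditor_name": creditor,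
--                 "account_number_masked": violation.get("account_number_masked", ""),
--                 "account_type": violation.get("account_type", ""),
--             })
--
--     # Stable sort by (creditor, mask): equal keys keep input order, so the
--     # first-in-input record (and its account_type) leads each equal-key run.
--     records.sort(key=lambda r: (r["creditor_name"], r["account_number_masked"]))
--
--     # Collapse consecutive duplicate keys, keeping the first of each run.
--     out = []
--     prev = None
--     for r in records:
--         k = (r["creditor_name"], r["account_number_masked"])
--         if k != prev:
--             out.append(r)
--             prev = k
--     return out
-- ===== Notes on version B (the rewrite author's own statement) =====
-- stated objective: alternative
-- what changed: Replaces the seen-set dedup-then-sort with map-to-records, one stable sort by (creditor, mask), and a single pass collapsing consecutive duplicate keys, relying on sort stability to keep the first-in-input record of each key.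
import Mathlib
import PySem

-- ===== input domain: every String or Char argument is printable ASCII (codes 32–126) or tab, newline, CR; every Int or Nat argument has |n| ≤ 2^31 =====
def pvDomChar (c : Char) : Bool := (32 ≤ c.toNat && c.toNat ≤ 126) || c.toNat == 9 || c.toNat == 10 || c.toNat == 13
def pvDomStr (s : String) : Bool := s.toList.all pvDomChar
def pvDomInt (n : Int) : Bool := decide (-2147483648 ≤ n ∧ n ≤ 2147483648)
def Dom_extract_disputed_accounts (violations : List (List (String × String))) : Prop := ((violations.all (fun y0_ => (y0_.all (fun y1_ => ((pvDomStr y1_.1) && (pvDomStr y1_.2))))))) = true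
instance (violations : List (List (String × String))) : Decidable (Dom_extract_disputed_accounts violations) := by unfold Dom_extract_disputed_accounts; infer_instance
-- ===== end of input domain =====

-- B replaces A's seen-set dedup-then-sort by map-to-records, one stable sort, and a single
-- pass collapsing consecutive duplicate (creditor, mask) keys; alternative decomposition, same cost.

-- shared dict helper: violation.get(k, "") — first-match lookup on the association list
def pvGet (v : List (String × String)) (k : String) : String := (v.lookup k).getD ""

-- ===== PORT A =====
-- loop body of A's 'for violation in violations' (state: accounts so far, seen keys)
def pvAStep (st : List (List (String × String)) × PySem.Set (String × String))
    (violation : List (String × String)) :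
    List (List (String × String)) × PySem.Set (String × String) :=
  let creditor := pvGet violation "creditor_name"
  let acct_mask := pvGet violation "account_number_masked"
  let key := (creditor, acct_mask)
  if key ∉ st.2 ∧ creditor ≠ "" then
    (st.1 ++ [[("creditor_name", creditor), ("account_number_masked", acct_mask),
               ("account_type", pvGet violation "account_type")]],
     PySem.Set.add st.2 key)
  else st

def extract_disputed_accounts (violations : List (List (String × String))) : List (List (String × String)) :=
  let st := violations.foldl pvAStep ([], PySem.Set.empty)
  PySem.List.sorted2 st.1 (fun a => pvGet a "creditor_name") (fun a => pvGet a "account_number_masked")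

-- ===== PORT B =====
-- loop body of B's first loop: append a record when the creditor is truthy
def pvBRecStep (acc : List (List (String × String))) (violation : List (String × String)) :
    List (List (String × String)) :=
  let creditor := pvGet violation "creditor_name"
  if creditor ≠ "" then
    acc ++ [[("creditor_name", creditor),
             ("account_number_masked", pvGet violation "account_number_masked"),
             ("account_type", pvGet violation "account_type")]]
  else acc

-- loop body of B's second loop: keep a record when its key differs from prev
def pvBColStep (st : List (List (String × String)) × Option (String × String))
    (r : List (String × String)) :
    List (List (String × String)) × Option (String × String) :=
  let k := (pvGet r "creditor_name", pvGet r "account_number_masked")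
  if some k ≠ st.2 then (st.1 ++ [r], some k) else st

def extract_disputed_accounts_alt (violations : List (List (String × String))) : List (List (String × String)) :=
  let records := violations.foldl pvBRecStep []
  let sortedRecs := PySem.List.sorted2 records
    (fun r => pvGet r "creditor_name") (fun r => pvGet r "account_number_masked")
  (sortedRecs.foldl pvBColStep ([], none)).1

-- ===== PRECONDITION & SPEC =====
def Spec_extract_disputed_accounts (violations : List (List (String × String))) (out : List (List (String × String))) : Prop := out = extract_disputed_accounts_alt violations
instance (violations : List (List (String × String))) (out : List (List (String × String))) : Decidable (Spec_extract_disputed_accounts violations out) := by unfold Spec_extract_disputed_accounts; infer_instance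

-- ===== CLAIM (what is proved, stated in full; the proofs are below) =====
def Claim_equal_extract_disputed_accounts : Prop := ∀ (violations : List (List (String × String))), Dom_extract_disputed_accounts violations → Spec_extract_disputed_accounts violations (extract_disputed_accounts violations)

-- ===== LEMMAS AND PROOFS =====

-- the raw sort/dedup key of a record, and its lexicographic version
def pvKp (r : List (String × String)) : String × String :=
  (pvGet r "creditor_name", pvGet r "account_number_masked")
def pvK (r : List (String × String)) : Lex (String × String) := toLex (pvKp r)

-- the record built from a violation (both ports build this literal dict)
def pvRecord (v : List (String × String)) : List (String × String) :=
  [("creditor_name", pvGet v "creditor_name"),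
   ("account_number_masked", pvGet v "account_number_masked"),
   ("account_type", pvGet v "account_type")]

-- records of the kept violations, in input order
def pvRecs (vs : List (List (String × String))) : List (List (String × String)) :=
  (vs.filter (fun v => pvGet v "creditor_name" != "")).map pvRecord

-- stable insertion (insertBy with the lex key), insertion sort, first-wins dedup,
-- and collapse-consecutive-duplicates
def pvIns (x : List (String × String)) (ys : List (List (String × String))) :
    List (List (String × String)) :=
  PySem.List.insertBy (fun a b => decide (pvK a < pvK b)) x ys

def pvIsort (xs : List (List (String × String))) : List (List (String × String)) :=
  xs.foldl (fun acc x => pvIns x acc) []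

def pvDedupStep (acc : List (List (String × String))) (x : List (String × String)) :
    List (List (String × String)) :=
  if pvK x ∈ acc.map pvK then acc else acc ++ [x]

def pvDedup (xs : List (List (String × String))) : List (List (String × String)) :=
  xs.foldl pvDedupStep []

def pvCol : List (String × String) → List (List (String × String)) → List (List (String × String))
  | _, [] => []
  | p, y :: ys => if pvK y = pvK p then pvCol p ys else y :: pvCol y ys

def pvCollapse : List (List (String × String)) → List (List (String × String))
  | [] => []
  | x :: xs => x :: pvCol x xs

lemma pvGet_record_c (c m t : String) :
    pvGet [("creditor_name", c), ("account_number_masked", m), ("account_type", t)]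
      "creditor_name" = c := by
  simp [pvGet, List.lookup]

lemma pvGet_record_m (c m t : String) :
    pvGet [("creditor_name", c), ("account_number_masked", m), ("account_type", t)]
      "account_number_masked" = m := by
  simp [pvGet, List.lookup]

lemma pvKp_record (v : List (String × String)) :
    pvKp (pvRecord v) = (pvGet v "creditor_name", pvGet v "account_number_masked") := by
  simp [pvKp, pvRecord, pvGet_record_c, pvGet_record_m]

lemma pvK_record (v : List (String × String)) :
    pvK (pvRecord v) = toLex (pvGet v "creditor_name", pvGet v "account_number_masked") := by
  simp [pvK, pvKp_record]

-- sorted2 with the two string keys IS insertion sort by the lexicographic key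
lemma pvBefore_eq (a b : List (String × String)) :
    (decide (pvGet a "creditor_name" < pvGet b "creditor_name") ||
      !decide (pvGet b "creditor_name" < pvGet a "creditor_name") &&
        decide (pvGet a "account_number_masked" < pvGet b "account_number_masked"))
      = decide (pvK a < pvK b) := by
  simp only [pvK, pvKp, Prod.Lex.lt_iff, ofLex_toLex]
  rcases lt_trichotomy (pvGet a "creditor_name") (pvGet b "creditor_name") with h | h | h
  · simp [h, not_lt_of_gt h]
  · simp [h]
  · simp [h, not_lt_of_gt h, ne_of_gt h]

lemma pvSorted2_eq_isort (xs : List (List (String × String))) :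
    PySem.List.sorted2 xs (fun r => pvGet r "creditor_name")
      (fun r => pvGet r "account_number_masked") = pvIsort xs := by
  show List.foldl _ [] xs = List.foldl _ [] xs
  congr 1
  funext acc x
  congr 1
  funext a b
  exact pvBefore_eq a b

lemma pvIsort_eq_sorted (xs : List (List (String × String))) :
    pvIsort xs = PySem.List.sorted xs pvK false :=
  (PySem.List.sorted_eq_foldl_insertBy xs pvK).symm

lemma pvIsort_pairwise (xs : List (List (String × String))) :
    (pvIsort xs).Pairwise (fun a b => pvK a ≤ pvK b) := by
  rw [pvIsort_eq_sorted]; exact PySem.List.sorted_pairwise xs pvK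

lemma pvIsort_perm (xs : List (List (String × String))) : (pvIsort xs).Perm xs := by
  rw [pvIsort_eq_sorted]; exact PySem.List.sorted_perm xs pvK false

lemma pvIsort_key_mem (xs : List (List (String × String))) (k : Lex (String × String)) :
    k ∈ (pvIsort xs).map pvK ↔ k ∈ xs.map pvK :=
  ((pvIsort_perm xs).map pvK).mem_iff

lemma pvIsort_append (xs : List (List (String × String))) (a : List (String × String)) :
    pvIsort (xs ++ [a]) = pvIns a (pvIsort xs) := by
  simp [pvIsort, List.foldl_append]

lemma pvIns_nil (a : List (String × String)) : pvIns a [] = [a] := by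
  simp [pvIns, PySem.List.insertBy]

lemma pvIns_cons (a y : List (String × String)) (ys : List (List (String × String))) :
    pvIns a (y :: ys) = if pvK a < pvK y then a :: y :: ys else y :: pvIns a ys := by
  simp [pvIns, PySem.List.insertBy]

lemma pvDedup_append (xs : List (List (String × String))) (a : List (String × String)) :
    pvDedup (xs ++ [a]) =
      if pvK a ∈ (pvDedup xs).map pvK then pvDedup xs else pvDedup xs ++ [a] := by
  simp [pvDedup, List.foldl_append, pvDedupStep]

lemma pvDedup_key_mem_aux (xs : List (List (String × String))) :
    ∀ (acc : List (List (String × String))) (k : Lex (String × String)),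
      k ∈ (xs.foldl pvDedupStep acc).map pvK ↔ k ∈ acc.map pvK ∨ k ∈ xs.map pvK := by
  induction xs with
  | nil => intro acc k; simp
  | cons x xs ih =>
    intro acc k
    simp only [List.foldl_cons, List.map_cons, List.mem_cons]
    by_cases h : pvK x ∈ acc.map pvK
    · rw [show pvDedupStep acc x = acc from if_pos h, ih]
      constructor
      · rintro (h' | h') <;> tauto
      · rintro (h' | h' | h')
        · tauto
        · exact Or.inl (h' ▸ h)
        · tauto
    · rw [show pvDedupStep acc x = acc ++ [x] from if_neg h, ih]
      simp only [List.map_append, List.mem_append, List.map_cons, List.map_nil,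
        List.mem_cons, List.not_mem_nil, or_false]
      tauto

lemma pvDedup_key_mem (xs : List (List (String × String))) (k : Lex (String × String)) :
    k ∈ (pvDedup xs).map pvK ↔ k ∈ xs.map pvK := by
  rw [pvDedup, pvDedup_key_mem_aux]; simp

-- collapse/insert commutation when the key is fresh (no order hypotheses needed)
lemma pvCol_ins_of_fresh :
    ∀ (zs : List (List (String × String))) (p a : List (String × String)),
      pvK p < pvK a → (∀ z ∈ zs, pvK z ≠ pvK a) →
      pvCol p (pvIns a zs) = pvIns a (pvCol p zs) := by
  intro zs
  induction zs with
  | nil =>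
    intro p a hpa _
    rw [pvIns_nil]
    simp [pvCol, pvIns_nil, (ne_of_gt hpa : pvK a ≠ pvK p)]
  | cons z zs ih =>
    intro p a hpa hfresh
    have hza : pvK z ≠ pvK a := hfresh z (List.mem_cons_self ..)
    rw [pvIns_cons]
    by_cases h1 : pvK a < pvK z
    · have hzp : pvK z ≠ pvK p := ne_of_gt (lt_trans hpa h1)
      rw [if_pos h1]
      show pvCol p (a :: z :: zs) = pvIns a (pvCol p (z :: zs))
      rw [show pvCol p (a :: z :: zs)
            = a :: pvCol a (z :: zs) from by simp [pvCol, (ne_of_gt hpa : pvK a ≠ pvK p)],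
          show pvCol a (z :: zs) = z :: pvCol z zs from by simp [pvCol, hza],
          show pvCol p (z :: zs) = z :: pvCol z zs from by simp [pvCol, hzp],
          pvIns_cons, if_pos h1]
    · have hza' : pvK z < pvK a := lt_of_le_of_ne (not_lt.mp h1) hza
      rw [if_neg h1]
      show pvCol p (z :: pvIns a zs) = pvIns a (pvCol p (z :: zs))
      by_cases h2 : pvK z = pvK p
      · rw [show pvCol p (z :: pvIns a zs) = pvCol p (pvIns a zs) from by simp [pvCol, h2],
            show pvCol p (z :: zs) = pvCol p zs from by simp [pvCol, h2]]
        exact ih p a hpa (fun w hw => hfresh w (List.mem_cons_of_mem _ hw))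
      · rw [show pvCol p (z :: pvIns a zs) = z :: pvCol z (pvIns a zs) from by simp [pvCol, h2],
            show pvCol p (z :: zs) = z :: pvCol z zs from by simp [pvCol, h2],
            pvIns_cons, if_neg h1]
        exact congrArg (z :: ·) (ih z a hza' (fun w hw => hfresh w (List.mem_cons_of_mem _ hw)))

-- inserting a key already present into a lower-bounded sorted list does not change the collapse
lemma pvCol_ins_of_mem :
    ∀ (ys : List (List (String × String))) (p a : List (String × String)),
      ys.Pairwise (fun x y => pvK x ≤ pvK y) → (∀ y ∈ ys, pvK p ≤ pvK y) →
      pvK p ≤ pvK a → (pvK a = pvK p ∨ pvK a ∈ ys.map pvK) →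
      pvCol p (pvIns a ys) = pvCol p ys := by
  intro ys
  induction ys with
  | nil =>
    intro p a _ _ _ hmem
    have h : pvK a = pvK p := by simpa using hmem
    rw [pvIns_nil]
    simp [pvCol, h]
  | cons z zs ih =>
    intro p a hpw hlb hpa hmem
    have hpz : pvK p ≤ pvK z := hlb z (List.mem_cons_self ..)
    have hzw : ∀ w ∈ zs, pvK z ≤ pvK w := (List.pairwise_cons.mp hpw).1
    rw [pvIns_cons]
    by_cases h1 : pvK a < pvK z
    · rw [if_pos h1]
      show pvCol p (a :: z :: zs) = pvCol p (z :: zs)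
      have hap : pvK a = pvK p := by
        rcases hmem with h | h
        · exact h
        · exfalso
          rcases (by simpa using h : pvK a = pvK z ∨ pvK a ∈ zs.map pvK) with h' | h'
          · exact absurd h' (ne_of_lt h1)
          · rcases List.mem_map.mp h' with ⟨w, hw, hwk⟩
            exact absurd (hwk ▸ hzw w hw) (not_le_of_gt h1)
      simp [pvCol, hap]
    · rw [if_neg h1]
      show pvCol p (z :: pvIns a zs) = pvCol p (z :: zs)
      by_cases h2 : pvK z = pvK p
      · rw [show pvCol p (z :: pvIns a zs) = pvCol p (pvIns a zs) from by simp [pvCol, h2],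
            show pvCol p (z :: zs) = pvCol p zs from by simp [pvCol, h2]]
        refine ih p a (List.pairwise_cons.mp hpw).2 (fun w hw => h2 ▸ hzw w hw) hpa ?_
        rcases hmem with h | h
        · exact Or.inl h
        · rcases (by simpa using h : pvK a = pvK z ∨ pvK a ∈ zs.map pvK) with h' | h'
          · exact Or.inl (h' ▸ h2)
          · exact Or.inr h'
      · rw [show pvCol p (z :: pvIns a zs) = z :: pvCol z (pvIns a zs) from by simp [pvCol, h2],
            show pvCol p (z :: zs) = z :: pvCol z zs from by simp [pvCol, h2]]
        refine congrArg (z :: ·) (ih z a (List.pairwise_cons.mp hpw).2 hzw (not_lt.mp h1) ?_)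
        rcases hmem with h | h
        · exact absurd (le_antisymm (h ▸ not_lt.mp h1) hpz) h2
        · rcases (by simpa using h : pvK a = pvK z ∨ pvK a ∈ zs.map pvK) with h' | h'
          · exact Or.inl h'
          · exact Or.inr h'
      
lemma pvCollapse_ins_of_mem (s : List (List (String × String))) (a : List (String × String))
    (hpw : s.Pairwise (fun x y => pvK x ≤ pvK y)) (h : pvK a ∈ s.map pvK) :
    pvCollapse (pvIns a s) = pvCollapse s := by
  cases s with
  | nil => simp at h
  | cons y ys =>
    have hyw : ∀ w ∈ ys, pvK y ≤ pvK w := (List.pairwise_cons.mp hpw).1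
    rw [pvIns_cons]
    by_cases h1 : pvK a < pvK y
    · exfalso
      rcases (by simpa using h : pvK a = pvK y ∨ pvK a ∈ ys.map pvK) with h' | h'
      · exact absurd h' (ne_of_lt h1)
      · rcases List.mem_map.mp h' with ⟨w, hw, hwk⟩
        exact absurd (hwk ▸ hyw w hw) (not_le_of_gt h1)
    · rw [if_neg h1]
      show pvCollapse (y :: pvIns a ys) = pvCollapse (y :: ys)
      show y :: pvCol y (pvIns a ys) = y :: pvCol y ys
      refine congrArg (y :: ·) (pvCol_ins_of_mem ys y a (List.pairwise_cons.mp hpw).2 hyw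
        (not_lt.mp h1) ?_)
      rcases (by simpa using h : pvK a = pvK y ∨ pvK a ∈ ys.map pvK) with h' | h'
      · exact Or.inl h'
      · exact Or.inr h'

lemma pvCollapse_ins_of_fresh (s : List (List (String × String))) (a : List (String × String))
    (h : pvK a ∉ s.map pvK) :
    pvCollapse (pvIns a s) = pvIns a (pvCollapse s) := by
  cases s with
  | nil => rw [pvIns_nil]; simp [pvCollapse, pvCol, pvIns_nil]
  | cons y ys =>
    have hya : pvK y ≠ pvK a := fun he => h (by simp [← he])
    have hfresh : ∀ z ∈ ys, pvK z ≠ pvK a := fun z hz he => h (by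
      simp only [List.map_cons, List.mem_cons]
      exact Or.inr (he ▸ List.mem_map_of_mem hz))
    rw [pvIns_cons]
    by_cases h1 : pvK a < pvK y
    · rw [if_pos h1]
      show pvCollapse (a :: y :: ys) = pvIns a (pvCollapse (y :: ys))
      show a :: pvCol a (y :: ys) = pvIns a (y :: pvCol y ys)
      rw [show pvCol a (y :: ys) = y :: pvCol y ys from by simp [pvCol, hya],
          pvIns_cons, if_pos h1]
    · have hya' : pvK y < pvK a := lt_of_le_of_ne (not_lt.mp h1) hya
      rw [if_neg h1]
      show pvCollapse (y :: pvIns a ys) = pvIns a (pvCollapse (y :: ys))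
      show y :: pvCol y (pvIns a ys) = pvIns a (y :: pvCol y ys)
      rw [pvCol_ins_of_fresh ys y a hya' hfresh, pvIns_cons, if_neg h1]

-- main structure theorem: sort-after-dedup = collapse-after-sort
lemma pvMain (xs : List (List (String × String))) :
    pvIsort (pvDedup xs) = pvCollapse (pvIsort xs) := by
  induction xs using List.reverseRecOn with
  | nil => simp [pvIsort, pvDedup, pvCollapse]
  | append_singleton xs a ih =>
    rw [pvDedup_append, pvIsort_append]
    by_cases h : pvK a ∈ (pvDedup xs).map pvK
    · rw [if_pos h, ih,
        (pvCollapse_ins_of_mem (pvIsort xs) a (pvIsort_pairwise xs)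
          ((pvIsort_key_mem xs (pvK a)).mpr ((pvDedup_key_mem xs (pvK a)).mp h)))]
    · rw [if_neg h, pvIsort_append, ih,
        (pvCollapse_ins_of_fresh (pvIsort xs) a
          (fun hm => h ((pvDedup_key_mem xs (pvK a)).mpr
            ((pvIsort_key_mem xs (pvK a)).mp hm))))]

-- A's loop builds exactly the first-wins dedup of the kept records
lemma pvRecs_cons (v : List (String × String)) (vs : List (List (String × String))) :
    pvRecs (v :: vs) =
      if pvGet v "creditor_name" ≠ "" then pvRecord v :: pvRecs vs else pvRecs vs := by
  by_cases h : pvGet v "creditor_name" = "" <;> simp [pvRecs, h]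

lemma pvA_loop :
    ∀ (vs : List (List (String × String))) (acc : List (List (String × String)))
      (seen : PySem.Set (String × String)),
      (∀ k : String × String, k ∈ seen ↔ toLex k ∈ acc.map pvK) →
      (vs.foldl pvAStep (acc, seen)).1 = (pvRecs vs).foldl pvDedupStep acc := by
  intro vs
  induction vs with
  | nil => intro acc seen _; simp [pvRecs]
  | cons v vs ih =>
    intro acc seen hinv
    rw [List.foldl_cons, pvRecs_cons]
    by_cases hc : pvGet v "creditor_name" = ""
    · rw [if_neg (by simpa using hc)]
      have : pvAStep (acc, seen) v = (acc, seen) := by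
        simp [pvAStep, hc]
      rw [this]
      exact ih acc seen hinv
    · rw [if_pos hc]
      rw [List.foldl_cons]
      by_cases hk : (pvGet v "creditor_name", pvGet v "account_number_masked") ∈ seen
      · have hstep : pvAStep (acc, seen) v = (acc, seen) := by
          simp [pvAStep, hk]
        have hmem : pvK (pvRecord v) ∈ acc.map pvK := by
          rw [pvK_record]; exact (hinv _).mp hk
        rw [hstep, show pvDedupStep acc (pvRecord v) = acc from if_pos hmem]
        exact ih acc seen hinv
      · have hstep : pvAStep (acc, seen) v =
            (acc ++ [pvRecord v],
             PySem.Set.add seen (pvGet v "creditor_name", pvGet v "account_number_masked")) := by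
          simp [pvAStep, pvRecord, hk, hc]
        have hmem : pvK (pvRecord v) ∉ acc.map pvK := by
          rw [pvK_record]; exact fun h => hk ((hinv _).mpr h)
        rw [hstep, show pvDedupStep acc (pvRecord v) = acc ++ [pvRecord v] from if_neg hmem]
        refine ih _ _ (fun k => ?_)
        rw [PySem.Set.mem_add]
        simp only [List.map_append, List.mem_append, pvK_record, List.map_cons, List.map_nil,
          List.mem_cons, List.not_mem_nil, or_false]
        rw [hinv k]
        constructor
        · rintro (h | h)
          · exact Or.inl h
          · exact Or.inr (by rw [h])
        · rintro (h | h)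
          · exact Or.inl h
          · exact Or.inr (toLex_inj.mp h)

lemma pvA_accounts (vs : List (List (String × String))) :
    (vs.foldl pvAStep ([], PySem.Set.empty)).1 = pvDedup (pvRecs vs) := by
  rw [pvA_loop vs [] PySem.Set.empty (fun k => by simp [PySem.Set.empty])]
  rfl

-- B's first loop builds the kept records
lemma pvB_records :
    ∀ (vs : List (List (String × String))) (acc : List (List (String × String))),
      vs.foldl pvBRecStep acc = acc ++ pvRecs vs := by
  intro vs
  induction vs with
  | nil => intro acc; simp [pvRecs]
  | cons v vs ih =>
    intro acc
    rw [List.foldl_cons, pvRecs_cons]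
    by_cases hc : pvGet v "creditor_name" = ""
    · rw [if_neg (by simpa using hc), show pvBRecStep acc v = acc from by simp [pvBRecStep, hc], ih]
    · rw [if_pos hc,
        show pvBRecStep acc v = acc ++ [pvRecord v] from by simp [pvBRecStep, pvRecord, hc], ih]
      simp

-- B's second loop is pvCollapse
lemma pvB_col_loop :
    ∀ (l : List (List (String × String))) (out : List (List (String × String)))
      (p : List (String × String)),
      (l.foldl pvBColStep (out, some (pvKp p))).1 = out ++ pvCol p l := by
  intro l
  induction l with
  | nil => intro out p; simp [pvCol]
  | cons y ys ih =>
    intro out p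
    rw [List.foldl_cons]
    by_cases h : pvKp y = pvKp p
    · have hK : pvK y = pvK p := by rw [pvK, pvK, h]
      rw [show pvBColStep (out, some (pvKp p)) y = (out, some (pvKp p)) from by
            simp [pvBColStep, pvKp] at *; simp [h],
          ih, show pvCol p (y :: ys) = pvCol p ys from by simp [pvCol, hK]]
    · have hK : pvK y ≠ pvK p := fun he => h (toLex_inj.mp he)
      rw [show pvBColStep (out, some (pvKp p)) y = (out ++ [y], some (pvKp y)) from by
            simp only [pvBColStep, pvKp] at *
            simp [h],
          ih, show pvCol p (y :: ys) = y :: pvCol y ys from by simp [pvCol, hK]]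
      simp

lemma pvB_collapse (l : List (List (String × String))) :
    (l.foldl pvBColStep ([], none)).1 = pvCollapse l := by
  cases l with
  | nil => simp [pvCollapse]
  | cons x xs =>
    rw [List.foldl_cons,
      show pvBColStep ([], none) x = ([x], some (pvKp x)) from by simp [pvBColStep, pvKp],
      pvB_col_loop xs [x] x]
    rfl

-- ===== VERDICT (by name: the statement is the Claim_ definition above) =====
theorem extract_disputed_accounts_spec : Claim_equal_extract_disputed_accounts := by
  intro violations _
  show extract_disputed_accounts violations = extract_disputed_accounts_alt violations
  show PySem.List.sorted2 (List.foldl pvAStep ([], PySem.Set.empty) violations).1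
      (fun a => pvGet a "creditor_name") (fun a => pvGet a "account_number_masked")
    = (List.foldl pvBColStep ([], none)
        (PySem.List.sorted2 (List.foldl pvBRecStep [] violations)
          (fun r => pvGet r "creditor_name") (fun r => pvGet r "account_number_masked"))).1
  rw [pvA_accounts, pvSorted2_eq_isort, pvMain, pvB_records, List.nil_append,
    pvSorted2_eq_isort, pvB_collapse]
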